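-- pv_equiv track=rewrite | github.com/chanyoonzhu/leetcode-python | amazon-Max_Shipping_Distance.py | maxShippingDist
-- ===== SOURCE A (Python) =====
-- def maxShippingDist(list1, list2, target):
--
--     #edge cases
--     if not list1 or not list1[0] or not list2 or not list2[0]:
--         return []
--
--     res = []
--     largestDist = 0
--     for item1 in list1:
--         for item2 in list2:
--             if len(item1) == 2 and len(item2) == 2:
--                 if item1[1] + item2[1] <= target:
--                     largestDist = max(largestDist, item1[1] + item2[1])
--     for item1 in list1:
--         for item2 in list2:
--             if len(item1) == 2 and len(item2) == 2:
--                 if item1[1] + item2[1] == largestDist: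
--                     res.append([item1[0], item2[0]])
--     return res
-- ===== SOURCE B (Python) =====
-- def maxShippingDist(list1, list2, target):
--     # edge cases
--     if not list1 or not list1[0] or not list2 or not list2[0]:
--         return []
--     # index list2 once: distance -> names carrying that distance, in order
--     index = {}
--     for it in list2:
--         if len(it) == 2:
--             index.setdefault(it[1], []).append(it[0])
--     # best feasible sum, scanning only the distinct distances of list2
--     best = 0
--     for it in list1:
--         if len(it) == 2:
--             for d2 in index:
--                 s = it[1] + d2
--                 if s <= target:
--                     best = max(best, s)
--     # collect pairs by direct lookup instead of a second nested scan
--     res = []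
--     for it in list1:
--         if len(it) == 2:
--             for name in index.get(best - it[1], []):
--                 res.append([it[0], name])
--     return res
-- ===== Notes on version B (the rewrite author's own statement) =====
-- stated objective: alternative
-- what changed: B builds a dict from distance to list of names of list2 once, computes the best feasible sum by scanning only the distinct distances, and emits the result pairs by direct dict lookup, replacing A's second full nested scan.
import Mathlib
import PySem

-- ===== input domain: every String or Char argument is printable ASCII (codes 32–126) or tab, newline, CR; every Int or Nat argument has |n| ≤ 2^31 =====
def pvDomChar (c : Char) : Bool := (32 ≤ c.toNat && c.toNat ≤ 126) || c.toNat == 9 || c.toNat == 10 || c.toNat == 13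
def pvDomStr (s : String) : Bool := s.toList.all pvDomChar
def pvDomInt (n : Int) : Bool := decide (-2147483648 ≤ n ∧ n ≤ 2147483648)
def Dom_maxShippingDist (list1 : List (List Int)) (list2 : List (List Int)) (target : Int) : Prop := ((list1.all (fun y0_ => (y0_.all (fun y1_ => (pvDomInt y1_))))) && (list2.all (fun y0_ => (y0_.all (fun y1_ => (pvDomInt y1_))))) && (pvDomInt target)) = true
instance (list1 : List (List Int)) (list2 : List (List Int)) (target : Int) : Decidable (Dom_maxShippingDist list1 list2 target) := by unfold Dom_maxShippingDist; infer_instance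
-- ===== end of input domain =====

-- B replaces A's second quadratic nested scan by a dict index of list2 built once; equivalence of return values is proved on all inputs.

-- ===== PORT A =====
-- 'not list1 or not list1[0]' : empty list, or first element an empty list
def pvEdgeEmpty (l : List (List Int)) : Bool :=
  match l with
  | [] => true
  | x :: _ => x.isEmpty

-- first nested loop of A (item[1] under the len == 2 guard is always in range, so getD is exact here)
def pvA_largest (list1 : List (List Int)) (list2 : List (List Int)) (target : Int) : Int :=
  list1.foldl (fun acc it1 =>
    list2.foldl (fun acc it2 =>
      if it1.length = 2 ∧ it2.length = 2 then
        if it1.getD 1 0 + it2.getD 1 0 ≤ target then max acc (it1.getD 1 0 + it2.getD 1 0) else acc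
      else acc) acc) 0

def maxShippingDist (list1 : List (List Int)) (list2 : List (List Int)) (target : Int) : List (List Int) :=
  if pvEdgeEmpty list1 || pvEdgeEmpty list2 then []
  else
    list1.foldl (fun res it1 =>
      list2.foldl (fun res it2 =>
        if it1.length = 2 ∧ it2.length = 2 then
          if it1.getD 1 0 + it2.getD 1 0 = pvA_largest list1 list2 target then
            res ++ [[it1.getD 0 0, it2.getD 0 0]]
          else res
        else res) res) []

-- ===== PORT B =====
-- index.setdefault(it[1], []).append(it[0])  =  modify it[1] [] (· ++ [it[0]])
def pvB_index (list2 : List (List Int)) : PySem.Dict Int (List Int) :=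
  list2.foldl (fun d it =>
    if it.length = 2 then d.modify (it.getD 1 0) [] (fun v => v ++ [it.getD 0 0]) else d)
    PySem.Dict.empty

-- 'for d2 in index' iterates the dict's keys
def pvB_best (list1 : List (List Int)) (list2 : List (List Int)) (target : Int) : Int :=
  list1.foldl (fun b it =>
    if it.length = 2 then
      (pvB_index list2).keys.foldl (fun b d2 =>
        if it.getD 1 0 + d2 ≤ target then max b (it.getD 1 0 + d2) else b) b
    else b) 0

def maxShippingDist_alt (list1 : List (List Int)) (list2 : List (List Int)) (target : Int) : List (List Int) :=
  if pvEdgeEmpty list1 || pvEdgeEmpty list2 then []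
  else
    list1.foldl (fun res it =>
      if it.length = 2 then
        ((pvB_index list2).getD (pvB_best list1 list2 target - it.getD 1 0) []).foldl
          (fun res name => res ++ [[it.getD 0 0, name]]) res
      else res) []

-- ===== PRECONDITION & SPEC =====
def Spec_maxShippingDist (list1 : List (List Int)) (list2 : List (List Int)) (target : Int) (out : List (List Int)) : Prop := out = maxShippingDist_alt list1 list2 target
instance (list1 : List (List Int)) (list2 : List (List Int)) (target : Int) (out : List (List Int)) : Decidable (Spec_maxShippingDist list1 list2 target out) := by unfold Spec_maxShippingDist; infer_instance

-- ===== CLAIM (what is proved, stated in full; the proofs are below) =====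
def Claim_equal_maxShippingDist : Prop := ∀ (list1 : List (List Int)) (list2 : List (List Int)) (target : Int), Dom_maxShippingDist list1 list2 target → Spec_maxShippingDist list1 list2 target (maxShippingDist list1 list2 target)

-- ===== LEMMAS AND PROOFS =====

-- skipping the guarded items is folding over the filtered list
theorem foldl_filter_if {α β : Type} (p : α → Prop) [DecidablePred p] (g : β → α → β) :
    ∀ (l : List α) (init : β),
      l.foldl (fun b x => if p x then g b x else b) init
        = (l.filter (fun x => decide (p x))).foldl g init := by
  intro l
  induction l with
  | nil => intro init; rfl
  | cons x l ih =>
    intro init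
    by_cases h : p x <;> simp [h, ih]

-- the two values list (d2) of list2's length-2 items
def pvVals2 (list2 : List (List Int)) : List Int :=
  (list2.filter (fun it => decide (it.length = 2))).map (fun it => it.getD 1 0)

theorem pvB_index_eq (list2 : List (List Int)) :
    pvB_index list2
      = ((list2.filter (fun it => decide (it.length = 2))).map
          (fun it => (it.getD 1 0, it.getD 0 0))).foldl
          (fun d p => d.modify p.1 [] (fun v => v ++ [p.2])) PySem.Dict.empty := by
  unfold pvB_index
  rw [foldl_filter_if]
  rw [List.foldl_map]

theorem pvB_index_getD (list2 : List (List Int)) (c : Int) :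
    (pvB_index list2).getD c []
      = ((list2.filter (fun it => decide (it.length = 2))).filter
          (fun it => it.getD 1 0 == c)).map (fun it => it.getD 0 0) := by
  rw [pvB_index_eq, PySem.Dict.getD_foldl_modify_append]
  simp [List.filter_map, List.map_map, Function.comp_def]

theorem pvB_index_keys_mem (list2 : List (List Int)) (x : Int) :
    x ∈ (pvB_index list2).keys ↔ x ∈ pvVals2 list2 := by
  rw [pvB_index_eq]
  rw [PySem.Dict.keys_foldl_modify_key]
  simp [PySem.Set.mem_update, pvVals2, List.map_map, Function.comp_def]

-- the inner max-accumulation step of both phase-1 loops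
def pvMaxStep (d1 target : Int) (l : List Int) (b : Int) : Int :=
  l.foldl (fun b v => if d1 + v ≤ target then max b (d1 + v) else b) b

theorem pvMaxStep_le (d1 target : Int) :
    ∀ (l : List Int) (b : Int), b ≤ pvMaxStep d1 target l b := by
  intro l
  induction l with
  | nil => intro b; simp [pvMaxStep]
  | cons v l ih =>
    intro b
    have h1 : b ≤ (if d1 + v ≤ target then max b (d1 + v) else b) := by
      split <;> simp
    calc b ≤ (if d1 + v ≤ target then max b (d1 + v) else b) := h1
      _ ≤ pvMaxStep d1 target l _ := ih _

theorem pvMaxStep_mem_le (d1 target : Int) :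
    ∀ (l : List Int) (b x : Int), x ∈ l → d1 + x ≤ target →
      d1 + x ≤ pvMaxStep d1 target l b := by
  intro l
  induction l with
  | nil => intro b x hx; simp at hx
  | cons v l ih =>
    intro b x hx hle
    rcases List.mem_cons.mp hx with h | h
    · subst h
      have h2 : d1 + x ≤ (if d1 + x ≤ target then max b (d1 + x) else b) := by
        simp [hle]
      calc d1 + x ≤ (if d1 + x ≤ target then max b (d1 + x) else b) := h2
        _ ≤ pvMaxStep d1 target l _ := pvMaxStep_le d1 target l _
    · exact ih _ x h hle

theorem pvMaxStep_cases (d1 target : Int) :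
    ∀ (l : List Int) (b : Int),
      pvMaxStep d1 target l b = b ∨
        ∃ x ∈ l, d1 + x ≤ target ∧ pvMaxStep d1 target l b = d1 + x := by
  intro l
  induction l with
  | nil => intro b; left; rfl
  | cons v l ih =>
    intro b
    have hstep : pvMaxStep d1 target (v :: l) b
        = pvMaxStep d1 target l (if d1 + v ≤ target then max b (d1 + v) else b) := rfl
    rcases ih (if d1 + v ≤ target then max b (d1 + v) else b) with h | ⟨x, hx, hle, he⟩
    · by_cases hc : d1 + v ≤ target
      · rcases max_choice b (d1 + v) with hm | hm
        · left; rw [hstep, h, if_pos hc, hm]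
        · right; exact ⟨v, List.mem_cons_self, hc, by rw [hstep, h, if_pos hc, hm]⟩
      · left; rw [hstep, h, if_neg hc]
    · right; exact ⟨x, List.mem_cons_of_mem _ hx, hle, by rw [hstep, he]⟩

theorem pvMaxStep_congr_mem (d1 target : Int) (l1 l2 : List Int)
    (h : ∀ x, x ∈ l1 ↔ x ∈ l2) (b : Int) :
    pvMaxStep d1 target l1 b = pvMaxStep d1 target l2 b := by
  have key : ∀ (la lb : List Int), (∀ x, x ∈ la ↔ x ∈ lb) →
      pvMaxStep d1 target la b ≤ pvMaxStep d1 target lb b := by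
    intro la lb hab
    rcases pvMaxStep_cases d1 target la b with he | ⟨x, hx, hle, he⟩
    · rw [he]; exact pvMaxStep_le d1 target lb b
    · rw [he]; exact pvMaxStep_mem_le d1 target lb b x ((hab x).mp hx) hle
  exact le_antisymm (key l1 l2 h) (key l2 l1 (fun x => (h x).symm))

-- folding a no-op keeps the accumulator
theorem foldl_id {α β : Type} : ∀ (l : List α) (b : β), l.foldl (fun b _ => b) b = b := by
  intro l
  induction l with
  | nil => intro b; rfl
  | cons x l ih => intro b; exact ih b

-- phase 1: A's largest feasible sum equals B's
theorem best_eq (list1 list2 : List (List Int)) (target : Int) :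
    pvA_largest list1 list2 target = pvB_best list1 list2 target := by
  unfold pvA_largest pvB_best
  apply PySem.List.foldl_congr_mem
  intro acc it1 _
  by_cases h1 : it1.length = 2
  · rw [if_pos h1]
    have hA : (list2.foldl (fun acc it2 =>
        if it1.length = 2 ∧ it2.length = 2 then
          if it1.getD 1 0 + it2.getD 1 0 ≤ target then max acc (it1.getD 1 0 + it2.getD 1 0) else acc
        else acc) acc)
        = pvMaxStep (it1.getD 1 0) target (pvVals2 list2) acc := by
      have hcongr : (list2.foldl (fun acc it2 =>
          if it1.length = 2 ∧ it2.length = 2 then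
            if it1.getD 1 0 + it2.getD 1 0 ≤ target then max acc (it1.getD 1 0 + it2.getD 1 0) else acc
          else acc) acc)
          = (list2.foldl (fun acc it2 =>
            if it2.length = 2 then
              if it1.getD 1 0 + it2.getD 1 0 ≤ target then max acc (it1.getD 1 0 + it2.getD 1 0) else acc
            else acc) acc) := by
        apply PySem.List.foldl_congr_mem
        intro b it2 _
        by_cases h2 : it2.length = 2
        · rw [if_pos ⟨h1, h2⟩, if_pos h2]
        · rw [if_neg (by tauto), if_neg h2]
      rw [hcongr, foldl_filter_if]
      unfold pvMaxStep pvVals2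
      rw [List.foldl_map]
    rw [hA]
    exact pvMaxStep_congr_mem _ _ _ _ (fun x => (pvB_index_keys_mem list2 x).symm) acc
  · rw [if_neg h1]
    have hz : (list2.foldl (fun acc it2 =>
        if it1.length = 2 ∧ it2.length = 2 then
          if it1.getD 1 0 + it2.getD 1 0 ≤ target then max acc (it1.getD 1 0 + it2.getD 1 0) else acc
        else acc) acc) = list2.foldl (fun b (_ : List Int) => b) acc := by
      apply PySem.List.foldl_congr_mem
      intro b it2 _
      rw [if_neg (by tauto)]
    rw [hz, foldl_id]

-- phase 2: the collection loops agree
theorem main_eq (list1 list2 : List (List Int)) (target : Int) :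
    maxShippingDist list1 list2 target = maxShippingDist_alt list1 list2 target := by
  unfold maxShippingDist maxShippingDist_alt
  by_cases hedge : (pvEdgeEmpty list1 || pvEdgeEmpty list2) = true
  · rw [if_pos hedge, if_pos hedge]
  · rw [if_neg hedge, if_neg hedge]
    apply PySem.List.foldl_congr_mem
    intro res it1 _
    by_cases h1 : it1.length = 2
    · rw [if_pos h1]
      -- left side: nested conditional append = filtered map
      have hcongr : (list2.foldl (fun res it2 =>
          if it1.length = 2 ∧ it2.length = 2 then
            if it1.getD 1 0 + it2.getD 1 0 = pvA_largest list1 list2 target then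
              res ++ [[it1.getD 0 0, it2.getD 0 0]]
            else res
          else res) res)
          = (list2.foldl (fun res it2 =>
            if (decide (it2.length = 2) && (it2.getD 1 0 == pvA_largest list1 list2 target - it1.getD 1 0)) = true then
              res ++ [[it1.getD 0 0, it2.getD 0 0]]
            else res) res) := by
        apply PySem.List.foldl_congr_mem
        intro b it2 _
        by_cases h2 : it2.length = 2
        · by_cases h3 : it1.getD 1 0 + it2.getD 1 0 = pvA_largest list1 list2 target
          · have hb : (decide (it2.length = 2) && (it2.getD 1 0 == pvA_largest list1 list2 target - it1.getD 1 0)) = true := by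
              simp only [h2, decide_true, Bool.true_and, beq_iff_eq]
              omega
            rw [if_pos ⟨h1, h2⟩, if_pos h3, if_pos hb]
          · have hb : ¬ (decide (it2.length = 2) && (it2.getD 1 0 == pvA_largest list1 list2 target - it1.getD 1 0)) = true := by
              simp only [h2, decide_true, Bool.true_and, beq_iff_eq]
              omega
            rw [if_pos ⟨h1, h2⟩, if_neg h3, if_neg hb]
        · have hb : ¬ (decide (it2.length = 2) && (it2.getD 1 0 == pvA_largest list1 list2 target - it1.getD 1 0)) = true := by
            simp [h2]
          rw [if_neg (fun hc => h2 hc.2), if_neg hb]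
      rw [hcongr, PySem.List.foldl_append_if]
      -- right side: fold-append over the dict bucket = filtered map
      rw [PySem.List.foldl_append_singleton_eq_map, best_eq list1 list2 target,
        pvB_index_getD list2 (pvB_best list1 list2 target - it1.getD 1 0)]
      rw [List.map_map, List.filter_filter]
      simp only [Function.comp_def]
      rw [List.filter_congr (fun x _ => Bool.and_comm (decide (x.length = 2))
        (x.getD 1 0 == pvB_best list1 list2 target - it1.getD 1 0))]
    · rw [if_neg h1]
      have hz : (list2.foldl (fun res it2 =>
          if it1.length = 2 ∧ it2.length = 2 then
            if it1.getD 1 0 + it2.getD 1 0 = pvA_largest list1 list2 target then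
              res ++ [[it1.getD 0 0, it2.getD 0 0]]
            else res
          else res) res) = list2.foldl (fun b (_ : List Int) => b) res := by
        apply PySem.List.foldl_congr_mem
        intro b it2 _
        rw [if_neg (by tauto)]
      rw [hz, foldl_id]

-- ===== VERDICT (by name: the statement is the Claim_ definition above) =====
theorem maxShippingDist_spec : Claim_equal_maxShippingDist := by
  intro list1 list2 target _
  unfold Spec_maxShippingDist
  exact main_eq list1 list2 target
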